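-- pv_equiv track=rewrite | github.com/wonby1n/ssafy_sparta | 2025.09/0924/01_codetree.py | found
-- ===== SOURCE A (Python) =====
-- def found(N,a,b,c):
--     cnt = 0
--     # 백의 자리 탐색
--     for i in range(1,N+1):
--         # 십의 자리 탐색
--         for j in range(1,N+1):
--             # 일의 자리 탐색
--             for k in range(1,N+1):
--                 # 한 자리라도 차이가 2 이내이면
--                 if abs(a-i) <= 2 or abs(b-j) <= 2 or abs(c-k)<= 2:
--                     cnt += 1
--
--     return cnt
-- ===== SOURCE B (Python) =====
-- def found(N, a, b, c):
--     # Complement count: total triples minus triples where every digit is out of range.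
--     M = N if N > 0 else 0
--     def out_count(x):
--         lo = x - 2 if x - 2 > 1 else 1
--         hi = x + 2 if x + 2 < M else M
--         within = hi - lo + 1 if hi - lo + 1 > 0 else 0
--         return M - within
--     return M ** 3 - out_count(a) * out_count(b) * out_count(c)
-- ===== Notes on version B (the rewrite author's own statement) =====
-- stated objective: faster
-- what changed: Replaces the O(N^3) triple nested loop with a closed-form complement count: total triples N^3 minus the product of the three per-axis out-of-range counts, each computed by interval arithmetic.
import Mathlib
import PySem

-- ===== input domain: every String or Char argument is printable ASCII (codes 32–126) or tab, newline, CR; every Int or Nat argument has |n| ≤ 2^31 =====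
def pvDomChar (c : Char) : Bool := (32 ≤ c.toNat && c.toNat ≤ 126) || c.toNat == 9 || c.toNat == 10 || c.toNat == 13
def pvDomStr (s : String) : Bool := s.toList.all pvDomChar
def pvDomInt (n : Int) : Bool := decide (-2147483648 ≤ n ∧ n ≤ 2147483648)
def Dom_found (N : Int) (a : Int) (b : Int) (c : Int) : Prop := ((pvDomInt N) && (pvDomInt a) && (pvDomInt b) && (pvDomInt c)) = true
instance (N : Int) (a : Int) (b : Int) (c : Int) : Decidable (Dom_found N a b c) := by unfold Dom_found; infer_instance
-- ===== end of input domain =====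

-- B replaces A's O(N^3) triple loop by an O(1) complement count: N^3 minus the product of per-axis out-of-range counts.

-- ===== PORT A =====
def found (N : Int) (a : Int) (b : Int) (c : Int) : Int :=
  (PySem.List.pyRange 1 (N+1) 1).foldl (fun cnt i =>
    (PySem.List.pyRange 1 (N+1) 1).foldl (fun cnt j =>
      (PySem.List.pyRange 1 (N+1) 1).foldl (fun cnt k =>
        if |a - i| ≤ 2 ∨ |b - j| ≤ 2 ∨ |c - k| ≤ 2 then cnt + 1 else cnt) cnt) cnt) 0

-- ===== PORT B =====
-- helper out_count of Source B: how many digits in [1, M] are NOT within 2 of x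
def outCount (M : Int) (x : Int) : Int :=
  let lo := if 1 < x - 2 then x - 2 else 1
  let hi := if x + 2 < M then x + 2 else M
  let within := if 0 < hi - lo + 1 then hi - lo + 1 else 0
  M - within

def found_alt (N : Int) (a : Int) (b : Int) (c : Int) : Int :=
  let M := if 0 < N then N else 0
  M ^ 3 - outCount M a * outCount M b * outCount M c

-- ===== PRECONDITION & SPEC =====
def Spec_found (N : Int) (a : Int) (b : Int) (c : Int) (out : Int) : Prop := out = found_alt N a b c
instance (N : Int) (a : Int) (b : Int) (c : Int) (out : Int) : Decidable (Spec_found N a b c out) := by unfold Spec_found; infer_instance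

-- ===== CLAIM (what is proved, stated in full; the proofs are below) =====
def Claim_equal_found : Prop := ∀ (N : Int) (a : Int) (b : Int) (c : Int), Dom_found N a b c → Spec_found N a b c (found N a b c)

-- ===== LEMMAS AND PROOFS =====

-- sum of a map of shape u - v * g t
lemma sum_sub_mul (l : List Int) (u v : Int) (g : Int → Int) :
    (l.map (fun t => u - v * g t)).sum = (l.length : Int) * u - v * (l.map g).sum := by
  induction l with
  | nil => simp
  | cons x xs ih => simp [ih]; ring

-- 0/1 indicator of a disjunction as a complement product
lemma ite_or3 (P Q R : Prop) [Decidable P] [Decidable Q] [Decidable R] :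
    (if P ∨ Q ∨ R then (1:Int) else 0)
      = 1 - (if ¬P then (1:Int) else 0) * (if ¬Q then (1:Int) else 0) * (if ¬R then (1:Int) else 0) := by
  by_cases hP : P <;> by_cases hQ : Q <;> by_cases hR : R <;> simp [hP, hQ, hR]

-- the per-axis out-of-range sum over range(a, a+n)
lemma outSum (n : Nat) : ∀ (a x : Int),
    ((PySem.List.pyRange a (a+n) 1).map (fun k => if ¬(|x - k| ≤ 2) then (1:Int) else 0)).sum
      = n - max 0 (min (a+n-1) (x+2) - max a (x-2) + 1) := by
  induction n with
  | zero =>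
    intro a x
    rw [show a + ((0:Nat):Int) = a by simp, PySem.List.pyRange_one_eq_nil (le_refl a)]
    simp only [List.map_nil, List.sum_nil, Nat.cast_zero]
    omega
  | succ m ih =>
    intro a x
    push_cast
    rw [PySem.List.pyRange_one_cons (by omega), show a + ((m:Int)+1) = (a+1) + m by ring]
    have h := ih (a+1) x
    have habs : ¬(|x - a| ≤ 2) ↔ (x - a < -2 ∨ 2 < x - a) := by
      rw [abs_le]; omega
    by_cases hc : ¬(|x - a| ≤ 2) <;>
      simp only [List.map_cons, List.sum_cons, if_pos hc, if_neg hc, h] <;>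
      rw [habs] at hc <;> (try push_cast) <;> omega

-- the per-axis sum over range(1, N+1) equals Source B's out_count
lemma outSum_eq (N x : Int) :
    ((PySem.List.pyRange 1 (N+1) 1).map (fun k => if ¬(|x - k| ≤ 2) then (1:Int) else 0)).sum
      = outCount (if 0 < N then N else 0) x := by
  by_cases hN : 0 < N
  · have hn : (1:Int) + (N.toNat : Int) = N + 1 := by omega
    have := outSum N.toNat 1 x
    rw [hn] at this
    rw [this]
    simp only [outCount, if_pos hN]
    split_ifs <;> omega
  · rw [PySem.List.pyRange_one_eq_nil (by omega)]
    simp only [List.map_nil, List.sum_nil, outCount, if_neg hN]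
    split_ifs <;> omega

lemma length_L (N : Int) : ((PySem.List.pyRange 1 (N+1) 1).length : Int) = if 0 < N then N else 0 := by
  rw [PySem.List.length_pyRange_one]; omega

theorem found_eq (N a b c : Int) : found N a b c = found_alt N a b c := by
  unfold found found_alt
  set L := PySem.List.pyRange 1 (N+1) 1 with hL
  set M : Int := if 0 < N then N else 0 with hM
  set oA : Int → Int := fun i => if ¬(|a - i| ≤ 2) then (1:Int) else 0 with hoA
  set oB : Int → Int := fun j => if ¬(|b - j| ≤ 2) then (1:Int) else 0 with hoB
  set oC : Int → Int := fun k => if ¬(|c - k| ≤ 2) then (1:Int) else 0 with hoC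
  have hlen : (L.length : Int) = M := length_L N
  have hSC : (L.map oC).sum = outCount M c := outSum_eq N c
  have hSB : (L.map oB).sum = outCount M b := outSum_eq N b
  have hSA : (L.map oA).sum = outCount M a := outSum_eq N a
  -- innermost loop: count of k
  have hinner : ∀ (i j cnt : Int),
      L.foldl (fun cnt k => if |a - i| ≤ 2 ∨ |b - j| ≤ 2 ∨ |c - k| ≤ 2 then cnt + 1 else cnt) cnt
        = cnt + (M - (oA i * oB j) * outCount M c) := by
    intro i j cnt
    have h1 : L.foldl (fun cnt k => if |a - i| ≤ 2 ∨ |b - j| ≤ 2 ∨ |c - k| ≤ 2 then cnt + 1 else cnt) cnt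
        = L.foldl (fun cnt k => cnt + (if |a - i| ≤ 2 ∨ |b - j| ≤ 2 ∨ |c - k| ≤ 2 then (1:Int) else 0)) cnt := by
      apply PySem.List.foldl_congr_mem
      intro acc x _
      split_ifs <;> ring
    rw [h1, PySem.List.foldl_add]
    have h2 : (L.map (fun k => if |a - i| ≤ 2 ∨ |b - j| ≤ 2 ∨ |c - k| ≤ 2 then (1:Int) else 0)).sum
        = (L.map (fun k => 1 - (oA i * oB j) * oC k)).sum := by
      apply congrArg
      apply List.map_congr_left
      intro k _
      rw [ite_or3]
    rw [h2, sum_sub_mul, hlen]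
    simp only [hoC] at hSC
    rw [hSC]; ring
  -- middle loop
  have hmid : ∀ (i cnt : Int),
      L.foldl (fun cnt j =>
        L.foldl (fun cnt k => if |a - i| ≤ 2 ∨ |b - j| ≤ 2 ∨ |c - k| ≤ 2 then cnt + 1 else cnt) cnt) cnt
        = cnt + (M * M - (oA i * outCount M c) * outCount M b) := by
    intro i cnt
    have h1 : L.foldl (fun cnt j =>
        L.foldl (fun cnt k => if |a - i| ≤ 2 ∨ |b - j| ≤ 2 ∨ |c - k| ≤ 2 then cnt + 1 else cnt) cnt) cnt
        = L.foldl (fun cnt j => cnt + (M - (oA i * outCount M c) * oB j)) cnt := by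
      apply PySem.List.foldl_congr_mem
      intro acc j _
      rw [hinner i j acc]; ring
    rw [h1, PySem.List.foldl_add, sum_sub_mul, hlen]
    simp only [hoB] at hSB
    rw [hSB]
  -- outer loop
  have houter :
      L.foldl (fun cnt i =>
        L.foldl (fun cnt j =>
          L.foldl (fun cnt k => if |a - i| ≤ 2 ∨ |b - j| ≤ 2 ∨ |c - k| ≤ 2 then cnt + 1 else cnt) cnt) cnt) 0
        = M * (M * M) - (outCount M c * outCount M b) * outCount M a := by
    have h1 : L.foldl (fun cnt i =>
        L.foldl (fun cnt j =>
          L.foldl (fun cnt k => if |a - i| ≤ 2 ∨ |b - j| ≤ 2 ∨ |c - k| ≤ 2 then cnt + 1 else cnt) cnt) cnt) 0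
        = L.foldl (fun cnt i => cnt + (M * M - (outCount M c * outCount M b) * oA i)) 0 := by
      apply PySem.List.foldl_congr_mem
      intro acc i _
      rw [hmid i acc]; ring
    rw [h1, PySem.List.foldl_add, sum_sub_mul, hlen]
    simp only [hoA] at hSA
    rw [hSA]; ring
  rw [houter]; ring

-- ===== VERDICT (by name: the statement is the Claim_ definition above) =====
theorem found_spec : Claim_equal_found := by
  intro N a b c _
  unfold Spec_found
  exact found_eq N a b c
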